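-- pv_equiv track=rewrite | github.com/Solam-Eteva/Manus_Aural_Sentience | src/resonance_lexicon.py | _create_cultural_poetry
-- ===== SOURCE A (Python) =====
-- def _create_cultural_poetry(cultural_echoes):
--     """Create poetic interpretations of cultural echoes"""
--     poetry = {}
--
--     for echo_type, description in cultural_echoes.items():
--         if "celebration" in description.lower():
--             poetry[echo_type] = {
--                 "archetypal_connection": "The spirit of celebration across all cultures",
--                 "poetic_description": "These frequencies carry the joy of human gathering"
--             }
--         elif "contemplative" in description.lower() or "lament" in description.lower():
--             poetry[echo_type] = {
--                 "archetypal_connection": "The universal language of contemplation",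
--                 "poetic_description": "These sounds echo the depth of human reflection"
--             }
--         elif "ritual" in description.lower() or "ceremonial" in description.lower():
--             poetry[echo_type] = {
--                 "archetypal_connection": "The sacred space of ritual and ceremony",
--                 "poetic_description": "These frequencies create sacred space across time and culture"
--             }
--         else:
--             poetry[echo_type] = {
--                 "archetypal_connection": "The universal human experience",
--                 "poetic_description": "These sounds speak the common language of humanity"
--             }
--
--     return poetry
-- ===== SOURCE B (Python) =====
-- _DEFAULT = {
--     "archetypal_connection": "The universal human experience",
--     "poetic_description": "These sounds speak the common language of humanity",
-- }
--
-- # Tiers listed from LOWEST to HIGHEST priority: each pass overwrites the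
-- # previous one, so the highest-priority matching tier wins, exactly like
-- # a first-match scan in the opposite order.
-- _TIERS = [
--     (("ritual", "ceremonial"), {
--         "archetypal_connection": "The sacred space of ritual and ceremony",
--         "poetic_description": "These frequencies create sacred space across time and culture",
--     }),
--     (("contemplative", "lament"), {
--         "archetypal_connection": "The universal language of contemplation",
--         "poetic_description": "These sounds echo the depth of human reflection",
--     }),
--     (("celebration",), {
--         "archetypal_connection": "The spirit of celebration across all cultures",
--         "poetic_description": "These frequencies carry the joy of human gathering",
--     }),
-- ]
--
--
-- def _create_cultural_poetry(cultural_echoes):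
--     """Create poetic interpretations of cultural echoes"""
--     texts = {k: d.lower() for k, d in cultural_echoes.items()}
--     # Stage 1: everyone starts with the default interpretation.
--     poetry = {k: dict(_DEFAULT) for k in texts}
--     # Stage 2: one sweep per tier, low priority first; later sweeps overwrite.
--     for words, entry in _TIERS:
--         for k, text in texts.items():
--             if any(w in text for w in words):
--                 poetry[k] = dict(entry)
--     return poetry
-- ===== Notes on version B (the rewrite author's own statement) =====
-- stated objective: alternative
-- what changed: Instead of classifying each item once with a first-match if/elif chain, B lowercases all descriptions in one pass, initialises every key with the default entry, then makes one overwrite sweep per tier in reverse priority order so the last matching sweep (highest priority) wins.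
import Mathlib
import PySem

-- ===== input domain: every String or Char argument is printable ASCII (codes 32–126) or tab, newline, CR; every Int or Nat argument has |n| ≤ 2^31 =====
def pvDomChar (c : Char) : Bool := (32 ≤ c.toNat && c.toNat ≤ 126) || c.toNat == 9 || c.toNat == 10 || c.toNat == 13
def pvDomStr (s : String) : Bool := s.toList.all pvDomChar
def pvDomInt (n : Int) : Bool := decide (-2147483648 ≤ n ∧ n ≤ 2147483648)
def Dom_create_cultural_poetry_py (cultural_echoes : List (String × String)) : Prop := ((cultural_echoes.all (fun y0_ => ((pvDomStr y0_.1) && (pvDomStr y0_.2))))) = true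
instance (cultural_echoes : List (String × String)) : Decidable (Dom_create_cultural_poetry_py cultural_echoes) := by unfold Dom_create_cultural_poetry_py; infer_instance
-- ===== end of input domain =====

-- B replaces A's per-item first-match if/elif chain by staged sweeps: every key first gets the default entry, then one overwrite pass per tier in reverse priority order, so the last matching pass (= highest priority) wins (objective: alternative; same cost).


-- ===== PORT A =====
def create_cultural_poetry_py (cultural_echoes : List (String × String)) : List (String × List (String × String)) :=
  (cultural_echoes.foldl (fun (poetry : PySem.Dict String (List (String × String))) p =>
    let echo_type := p.1
    let description := p.2
    if PySem.Str.isIn "celebration" (PySem.Str.lower description) then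
      PySem.Dict.insert poetry echo_type
        [("archetypal_connection", "The spirit of celebration across all cultures"),
         ("poetic_description", "These frequencies carry the joy of human gathering")]
    else if PySem.Str.isIn "contemplative" (PySem.Str.lower description) ||
            PySem.Str.isIn "lament" (PySem.Str.lower description) then
      PySem.Dict.insert poetry echo_type
        [("archetypal_connection", "The universal language of contemplation"),
         ("poetic_description", "These sounds echo the depth of human reflection")]
    else if PySem.Str.isIn "ritual" (PySem.Str.lower description) ||
            PySem.Str.isIn "ceremonial" (PySem.Str.lower description) then
      PySem.Dict.insert poetry echo_type
        [("archetypal_connection", "The sacred space of ritual and ceremony"),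
         ("poetic_description", "These frequencies create sacred space across time and culture")]
    else
      PySem.Dict.insert poetry echo_type
        [("archetypal_connection", "The universal human experience"),
         ("poetic_description", "These sounds speak the common language of humanity")]) PySem.Dict.empty).items

-- ===== PORT B =====
-- Source B's _DEFAULT and _TIERS (tiers from lowest to highest priority; later sweeps overwrite)
def pvDefault : List (String × String) :=
  [("archetypal_connection", "The universal human experience"),
   ("poetic_description", "These sounds speak the common language of humanity")]

def pvTiers : List (List String × List (String × String)) :=
  [(["ritual", "ceremonial"],
    [("archetypal_connection", "The sacred space of ritual and ceremony"),
     ("poetic_description", "These frequencies create sacred space across time and culture")]),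
   (["contemplative", "lament"],
    [("archetypal_connection", "The universal language of contemplation"),
     ("poetic_description", "These sounds echo the depth of human reflection")]),
   (["celebration"],
    [("archetypal_connection", "The spirit of celebration across all cultures"),
     ("poetic_description", "These frequencies carry the joy of human gathering")])]

def create_cultural_poetry_py_alt (cultural_echoes : List (String × String)) : List (String × List (String × String)) :=
  -- texts = {k: d.lower() for k, d in cultural_echoes.items()}
  let texts : PySem.Dict String String :=
    cultural_echoes.foldl (fun d p => d.insert p.1 (PySem.Str.lower p.2)) PySem.Dict.empty
  -- poetry = {k: dict(_DEFAULT) for k in texts}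
  let poetry0 : PySem.Dict String (List (String × String)) :=
    texts.keys.foldl (fun d k => d.insert k pvDefault) PySem.Dict.empty
  -- for words, entry in _TIERS: for k, text in texts.items(): if any(...): poetry[k] = dict(entry)
  let poetry := pvTiers.foldl (fun poetry t =>
    texts.items.foldl (fun d p =>
      if t.1.any (fun w => PySem.Str.isIn w p.2) then d.insert p.1 t.2 else d) poetry) poetry0
  poetry.items

-- ===== PRECONDITION & SPEC =====
def Spec_create_cultural_poetry_py (cultural_echoes : List (String × String)) (out : List (String × List (String × String))) : Prop := out = create_cultural_poetry_py_alt cultural_echoes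
instance (cultural_echoes : List (String × String)) (out : List (String × List (String × String))) : Decidable (Spec_create_cultural_poetry_py cultural_echoes out) := by unfold Spec_create_cultural_poetry_py; infer_instance

-- ===== CLAIM (what is proved, stated in full; the proofs are below) =====
def Claim_equal_create_cultural_poetry_py : Prop := ∀ (cultural_echoes : List (String × String)), Dom_create_cultural_poetry_py cultural_echoes → Spec_create_cultural_poetry_py cultural_echoes (create_cultural_poetry_py cultural_echoes)

-- ===== LEMMAS AND PROOFS =====

-- mval f l : the items list l with f applied to every value (keys and order untouched)
def pvMval (f : String → List (String × String)) (l : List (String × String)) :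
    List (String × List (String × String)) := l.map (fun p => (p.1, f p.2))

-- A's classification of an already-lowercased text (the if/elif chain's value)
def pvCls (t : String) : List (String × String) :=
  if PySem.Str.isIn "celebration" t then
    [("archetypal_connection", "The spirit of celebration across all cultures"),
     ("poetic_description", "These frequencies carry the joy of human gathering")]
  else if PySem.Str.isIn "contemplative" t || PySem.Str.isIn "lament" t then
    [("archetypal_connection", "The universal language of contemplation"),
     ("poetic_description", "These sounds echo the depth of human reflection")]
  else if PySem.Str.isIn "ritual" t || PySem.Str.isIn "ceremonial" t then
    [("archetypal_connection", "The sacred space of ritual and ceremony"),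
     ("poetic_description", "These frequencies create sacred space across time and culture")]
  else pvDefault

-- inserting f v into the f-image of d is the f-image of inserting v into d
theorem pv_insert_mval (f : String → List (String × String))
    (d : PySem.Dict String String) (k v : String) :
    (PySem.Dict.mk (pvMval f d.items)).insert k (f v)
      = PySem.Dict.mk (pvMval f (d.insert k v).items) := by
  have hc : (PySem.Dict.mk (pvMval f d.items)).contains k = d.contains k := by
    rw [PySem.Dict.contains_mk,
      show d.contains k = d.items.any (fun p => p.1 == k) from PySem.Dict.contains_mk d.items k]
    simp [pvMval, List.any_map, Function.comp_def]
  apply PySem.Dict.ext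
  cases h : d.contains k with
  | true =>
      rw [PySem.Dict.items_insert_of_contains _ _ (by rw [hc]; exact h)]
      rw [show (PySem.Dict.mk (pvMval f d.items)).items = pvMval f d.items from rfl,
          show (PySem.Dict.mk (pvMval f (d.insert k v).items)).items
            = pvMval f (d.insert k v).items from rfl,
          PySem.Dict.items_insert_of_contains _ _ h]
      simp only [pvMval, List.map_map]
      apply List.map_congr_left
      intro p _
      by_cases hk : p.1 = k <;> simp [Function.comp, hk]
  | false =>
      rw [PySem.Dict.items_insert_of_not_contains _ _ (by rw [hc]; exact h)]
      rw [show (PySem.Dict.mk (pvMval f d.items)).items = pvMval f d.items from rfl,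
          show (PySem.Dict.mk (pvMval f (d.insert k v).items)).items
            = pvMval f (d.insert k v).items from rfl,
          PySem.Dict.items_insert_of_not_contains _ _ h]
      simp [pvMval]

-- A's fold is the pvCls-image of the texts fold
theorem pv_foldA (ces : List (String × String)) :
    ∀ (d : PySem.Dict String String),
    ces.foldl (fun d p => d.insert p.1 (pvCls (PySem.Str.lower p.2)))
        (PySem.Dict.mk (pvMval pvCls d.items))
      = PySem.Dict.mk (pvMval pvCls
          (ces.foldl (fun d p => d.insert p.1 (PySem.Str.lower p.2)) d).items) := by
  induction ces with
  | nil => intro d; rfl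
  | cons p rest ih =>
      intro d
      simp only [List.foldl_cons]
      rw [pv_insert_mval pvCls d p.1 (PySem.Str.lower p.2)]
      exact ih (d.insert p.1 (PySem.Str.lower p.2))

-- one overwrite sweep over an items list with distinct keys rewrites the value map
theorem pv_pass (c : String → Bool) (e : List (String × String))
    (h : String → List (String × String)) (l : List (String × String)) :
    ∀ (pre : List (String × List (String × String))),
    (pre.map Prod.fst ++ l.map Prod.fst).Nodup →
    l.foldl (fun d p => if c p.2 then d.insert p.1 e else d)
        (PySem.Dict.mk (pre ++ pvMval h l))
      = PySem.Dict.mk (pre ++ pvMval (fun t => if c t then e else h t) l) := by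
  induction l with
  | nil => intro pre _; rfl
  | cons p rest ih =>
      intro pre hnd
      have hp_pre : p.1 ∉ pre.map Prod.fst := by
        intro hmem
        exact (List.disjoint_of_nodup_append hnd) hmem (by simp)
      have hp_rest : p.1 ∉ rest.map Prod.fst := by
        have h1 : (p.1 :: rest.map Prod.fst).Nodup := (List.nodup_append.mp hnd).2.1
        exact (List.nodup_cons.mp h1).1
      have hnd' : ((pre ++ [(p.1, if c p.2 then e else h p.2)]).map Prod.fst
          ++ rest.map Prod.fst).Nodup := by
        simpa [List.append_assoc] using hnd
      simp only [List.foldl_cons]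
      cases hc : c p.2 with
      | false =>
          have := ih (pre ++ [(p.1, if c p.2 then e else h p.2)]) hnd'
          simp only [hc, if_false, Bool.false_eq_true] at this ⊢
          simpa [pvMval, List.append_assoc, hc] using this
      | true =>
          have hins : (PySem.Dict.mk (pre ++ pvMval h (p :: rest))).insert p.1 e
              = PySem.Dict.mk (pre ++ (p.1, e) :: pvMval h rest) := by
            have hcont : (PySem.Dict.mk (pre ++ pvMval h (p :: rest))).contains p.1 = true := by
              simp [PySem.Dict.contains_mk, pvMval]
            apply PySem.Dict.ext
            rw [PySem.Dict.items_insert_of_contains _ _ hcont]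
            rw [show (PySem.Dict.mk (pre ++ pvMval h (p :: rest))).items
                = pre ++ pvMval h (p :: rest) from rfl,
              show (PySem.Dict.mk (pre ++ (p.1, e) :: pvMval h rest)).items
                = pre ++ (p.1, e) :: pvMval h rest from rfl]
            simp only [pvMval, List.map_cons, List.map_append]
            congr 1
            · rw [List.map_congr_left (g := id) (fun q hq => by
                  have hne : q.1 ≠ p.1 := fun habs => hp_pre (habs ▸ List.mem_map_of_mem hq)
                  simp [hne]),
                List.map_id]
            · congr 1
              · simp
              · rw [List.map_congr_left (g := id) (fun q hq => by
                    have hq1 : q.1 ∈ rest.map Prod.fst := by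
                      rcases List.mem_map.mp hq with ⟨r, hr, rfl⟩
                      exact List.mem_map_of_mem hr
                    have hne : q.1 ≠ p.1 := fun habs => hp_rest (habs ▸ hq1)
                    simp [hne]),
                  List.map_id]
          rw [hins]
          have := ih (pre ++ [(p.1, if c p.2 then e else h p.2)]) hnd'
          simp only [hc, if_true] at this ⊢
          simpa [pvMval, List.append_assoc, hc] using this

-- ===== VERDICT (by name: the statement is the Claim_ definition above) =====
theorem create_cultural_poetry_py_spec : Claim_equal_create_cultural_poetry_py := by
  intro ces _
  unfold Spec_create_cultural_poetry_py create_cultural_poetry_py create_cultural_poetry_py_alt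
  set texts : PySem.Dict String String :=
    ces.foldl (fun d p => d.insert p.1 (PySem.Str.lower p.2)) PySem.Dict.empty with htexts
  have hnodup : (texts.items.map Prod.fst).Nodup := by
    have := PySem.Dict.nodup_keys_foldl_insert_key ces Prod.fst
      (fun _ p => PySem.Str.lower p.2) PySem.Dict.empty PySem.Dict.nodup_keys_empty
    rw [htexts]
    simpa [PySem.Dict.keys] using this
  -- A's dict is the pvCls-image of texts
  have hA : ces.foldl (fun d p => d.insert p.1 (pvCls (PySem.Str.lower p.2))) PySem.Dict.empty
      = PySem.Dict.mk (pvMval pvCls texts.items) := by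
    have h := pv_foldA ces PySem.Dict.empty
    rw [show (PySem.Dict.mk (pvMval pvCls (PySem.Dict.empty : PySem.Dict String String).items))
        = (PySem.Dict.empty : PySem.Dict String (List (String × String))) from rfl] at h
    rw [htexts]
    exact h
  -- poetry0 is the constant-default image of texts
  have h0 : texts.keys.foldl (fun d k => d.insert k pvDefault) PySem.Dict.empty
      = PySem.Dict.mk (pvMval (fun _ => pvDefault) texts.items) := by
    apply PySem.Dict.ext
    have hfresh := PySem.Dict.items_foldl_insert_fresh texts.keys (fun x => x)
      (fun _ => pvDefault) (PySem.Dict.empty : PySem.Dict String (List (String × String)))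
      (fun _ _ => PySem.Dict.contains_empty _) (by simpa [PySem.Dict.keys] using hnodup)
    rw [show texts.keys.foldl (fun d k => d.insert k pvDefault)
          (PySem.Dict.empty : PySem.Dict String (List (String × String)))
        = texts.keys.foldl (fun d a => d.insert ((fun x => x) a) ((fun _ => pvDefault) a))
            (PySem.Dict.empty : PySem.Dict String (List (String × String))) from rfl,
      hfresh]
    simp [pvMval, PySem.Dict.keys, List.map_map, Function.comp_def, PySem.Dict.empty]
  have hstepA : (fun (poetry : PySem.Dict String (List (String × String))) (p : String × String) =>
      if PySem.Str.isIn "celebration" (PySem.Str.lower p.2) then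
        poetry.insert p.1 [("archetypal_connection", "The spirit of celebration across all cultures"),
         ("poetic_description", "These frequencies carry the joy of human gathering")]
      else if PySem.Str.isIn "contemplative" (PySem.Str.lower p.2) ||
              PySem.Str.isIn "lament" (PySem.Str.lower p.2) then
        poetry.insert p.1 [("archetypal_connection", "The universal language of contemplation"),
         ("poetic_description", "These sounds echo the depth of human reflection")]
      else if PySem.Str.isIn "ritual" (PySem.Str.lower p.2) ||
              PySem.Str.isIn "ceremonial" (PySem.Str.lower p.2) then
        poetry.insert p.1 [("archetypal_connection", "The sacred space of ritual and ceremony"),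
         ("poetic_description", "These frequencies create sacred space across time and culture")]
      else
        poetry.insert p.1 pvDefault)
      = (fun (d : PySem.Dict String (List (String × String))) (p : String × String) =>
          d.insert p.1 (pvCls (PySem.Str.lower p.2))) := by
    funext d p
    simp only [pvCls]
    split_ifs <;> rfl
  have hp1 : texts.items.foldl (fun (d : PySem.Dict String (List (String × String))) (p : String × String) => if ["ritual", "ceremonial"].any (fun w => PySem.Str.isIn w p.2) then d.insert p.1 [("archetypal_connection", "The sacred space of ritual and ceremony"),
         ("poetic_description", "These frequencies create sacred space across time and culture")] else d)
        (PySem.Dict.mk (pvMval (fun _ => pvDefault) texts.items))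
      = PySem.Dict.mk (pvMval (fun t => if ["ritual", "ceremonial"].any (fun w => PySem.Str.isIn w t) then [("archetypal_connection", "The sacred space of ritual and ceremony"),
         ("poetic_description", "These frequencies create sacred space across time and culture")] else pvDefault) texts.items) :=
    pv_pass (fun t => ["ritual", "ceremonial"].any (fun w => PySem.Str.isIn w t))
      [("archetypal_connection", "The sacred space of ritual and ceremony"),
         ("poetic_description", "These frequencies create sacred space across time and culture")]
      (fun _ => pvDefault) texts.items [] (by simpa using hnodup)
  have hp2 : texts.items.foldl (fun (d : PySem.Dict String (List (String × String))) (p : String × String) => if ["contemplative", "lament"].any (fun w => PySem.Str.isIn w p.2) then d.insert p.1 [("archetypal_connection", "The universal language of contemplation"),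
         ("poetic_description", "These sounds echo the depth of human reflection")] else d)
        (PySem.Dict.mk (pvMval (fun t => if ["ritual", "ceremonial"].any (fun w => PySem.Str.isIn w t) then [("archetypal_connection", "The sacred space of ritual and ceremony"),
         ("poetic_description", "These frequencies create sacred space across time and culture")] else pvDefault) texts.items))
      = PySem.Dict.mk (pvMval (fun t => if ["contemplative", "lament"].any (fun w => PySem.Str.isIn w t) then [("archetypal_connection", "The universal language of contemplation"),
         ("poetic_description", "These sounds echo the depth of human reflection")] else if ["ritual", "ceremonial"].any (fun w => PySem.Str.isIn w t) then [("archetypal_connection", "The sacred space of ritual and ceremony"),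
         ("poetic_description", "These frequencies create sacred space across time and culture")] else pvDefault) texts.items) :=
    pv_pass (fun t => ["contemplative", "lament"].any (fun w => PySem.Str.isIn w t))
      [("archetypal_connection", "The universal language of contemplation"),
         ("poetic_description", "These sounds echo the depth of human reflection")]
      (fun t => if ["ritual", "ceremonial"].any (fun w => PySem.Str.isIn w t) then [("archetypal_connection", "The sacred space of ritual and ceremony"),
         ("poetic_description", "These frequencies create sacred space across time and culture")] else pvDefault) texts.items [] (by simpa using hnodup)
  have hp3 : texts.items.foldl (fun (d : PySem.Dict String (List (String × String))) (p : String × String) => if ["celebration"].any (fun w => PySem.Str.isIn w p.2) then d.insert p.1 [("archetypal_connection", "The spirit of celebration across all cultures"),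
         ("poetic_description", "These frequencies carry the joy of human gathering")] else d)
        (PySem.Dict.mk (pvMval (fun t => if ["contemplative", "lament"].any (fun w => PySem.Str.isIn w t) then [("archetypal_connection", "The universal language of contemplation"),
         ("poetic_description", "These sounds echo the depth of human reflection")] else if ["ritual", "ceremonial"].any (fun w => PySem.Str.isIn w t) then [("archetypal_connection", "The sacred space of ritual and ceremony"),
         ("poetic_description", "These frequencies create sacred space across time and culture")] else pvDefault) texts.items))
      = PySem.Dict.mk (pvMval (fun t => if ["celebration"].any (fun w => PySem.Str.isIn w t) then [("archetypal_connection", "The spirit of celebration across all cultures"),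
         ("poetic_description", "These frequencies carry the joy of human gathering")] else if ["contemplative", "lament"].any (fun w => PySem.Str.isIn w t) then [("archetypal_connection", "The universal language of contemplation"),
         ("poetic_description", "These sounds echo the depth of human reflection")] else if ["ritual", "ceremonial"].any (fun w => PySem.Str.isIn w t) then [("archetypal_connection", "The sacred space of ritual and ceremony"),
         ("poetic_description", "These frequencies create sacred space across time and culture")] else pvDefault) texts.items) :=
    pv_pass (fun t => ["celebration"].any (fun w => PySem.Str.isIn w t))
      [("archetypal_connection", "The spirit of celebration across all cultures"),
         ("poetic_description", "These frequencies carry the joy of human gathering")]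
      (fun t => if ["contemplative", "lament"].any (fun w => PySem.Str.isIn w t) then [("archetypal_connection", "The universal language of contemplation"),
         ("poetic_description", "These sounds echo the depth of human reflection")] else if ["ritual", "ceremonial"].any (fun w => PySem.Str.isIn w t) then [("archetypal_connection", "The sacred space of ritual and ceremony"),
         ("poetic_description", "These frequencies create sacred space across time and culture")] else pvDefault) texts.items [] (by simpa using hnodup)
  show (ces.foldl (fun (poetry : PySem.Dict String (List (String × String))) (p : String × String) =>
      if PySem.Str.isIn "celebration" (PySem.Str.lower p.2) then
        poetry.insert p.1 [("archetypal_connection", "The spirit of celebration across all cultures"),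
         ("poetic_description", "These frequencies carry the joy of human gathering")]
      else if PySem.Str.isIn "contemplative" (PySem.Str.lower p.2) ||
              PySem.Str.isIn "lament" (PySem.Str.lower p.2) then
        poetry.insert p.1 [("archetypal_connection", "The universal language of contemplation"),
         ("poetic_description", "These sounds echo the depth of human reflection")]
      else if PySem.Str.isIn "ritual" (PySem.Str.lower p.2) ||
              PySem.Str.isIn "ceremonial" (PySem.Str.lower p.2) then
        poetry.insert p.1 [("archetypal_connection", "The sacred space of ritual and ceremony"),
         ("poetic_description", "These frequencies create sacred space across time and culture")]
      else
        poetry.insert p.1 pvDefault) PySem.Dict.empty).items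
    = (texts.items.foldl (fun (d : PySem.Dict String (List (String × String))) (p : String × String) => if ["celebration"].any (fun w => PySem.Str.isIn w p.2) then d.insert p.1 [("archetypal_connection", "The spirit of celebration across all cultures"),
         ("poetic_description", "These frequencies carry the joy of human gathering")] else d)
        (texts.items.foldl (fun (d : PySem.Dict String (List (String × String))) (p : String × String) => if ["contemplative", "lament"].any (fun w => PySem.Str.isIn w p.2) then d.insert p.1 [("archetypal_connection", "The universal language of contemplation"),
         ("poetic_description", "These sounds echo the depth of human reflection")] else d)
          (texts.items.foldl (fun (d : PySem.Dict String (List (String × String))) (p : String × String) => if ["ritual", "ceremonial"].any (fun w => PySem.Str.isIn w p.2) then d.insert p.1 [("archetypal_connection", "The sacred space of ritual and ceremony"),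
         ("poetic_description", "These frequencies create sacred space across time and culture")] else d)
            (texts.keys.foldl (fun d k => d.insert k pvDefault) PySem.Dict.empty)))).items
  rw [hstepA, hA, h0, hp1, hp2, hp3]
  show pvMval pvCls texts.items = pvMval (fun t => if ["celebration"].any (fun w => PySem.Str.isIn w t) then [("archetypal_connection", "The spirit of celebration across all cultures"),
         ("poetic_description", "These frequencies carry the joy of human gathering")] else if ["contemplative", "lament"].any (fun w => PySem.Str.isIn w t) then [("archetypal_connection", "The universal language of contemplation"),
         ("poetic_description", "These sounds echo the depth of human reflection")] else if ["ritual", "ceremonial"].any (fun w => PySem.Str.isIn w t) then [("archetypal_connection", "The sacred space of ritual and ceremony"),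
         ("poetic_description", "These frequencies create sacred space across time and culture")] else pvDefault) texts.items
  unfold pvMval
  apply List.map_congr_left
  intro p _
  have hcp : pvCls p.2 = (fun t => if ["celebration"].any (fun w => PySem.Str.isIn w t) then [("archetypal_connection", "The spirit of celebration across all cultures"),
         ("poetic_description", "These frequencies carry the joy of human gathering")] else if ["contemplative", "lament"].any (fun w => PySem.Str.isIn w t) then [("archetypal_connection", "The universal language of contemplation"),
         ("poetic_description", "These sounds echo the depth of human reflection")] else if ["ritual", "ceremonial"].any (fun w => PySem.Str.isIn w t) then [("archetypal_connection", "The sacred space of ritual and ceremony"),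
         ("poetic_description", "These frequencies create sacred space across time and culture")] else pvDefault) p.2 := by
    simp only [pvCls, List.any_cons, List.any_nil, Bool.or_false]
  rw [hcp]
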